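-- pv_equiv track=rewrite | github.com/mayelespino/code | EXERCISES/arrayManipulation01/arrayManipulation.py | solution
-- ===== SOURCE A (Python) =====
-- def solution(array):
--     if len(array) == 1:
--         return array
--     if len(array) == 2:
--         result = [0,0]
--         result[0] = array[0] + array[1]
--         result[1] = array[0] + array[1]
--         return result
--
--     aSize = len(array)
--     result = [0 for _ in range(aSize)]
--     result[0] = array[0] + array[1]
--     result[aSize - 1] = array[aSize - 1] + array[aSize - 2]
--     for i in range(1,aSize -1):
--         result[i] = array[i-1] + array[i] + array[i+1]
--     return result
-- ===== SOURCE B (Python) =====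
-- def solution(array):
--     if len(array) == 1:
--         return array
--     n = len(array)
--     P = [0]
--     for x in array:
--         P.append(P[-1] + x)
--     return [P[min(i + 2, n)] - P[max(i - 1, 0)] for i in range(n)]
-- ===== Notes on version B (the rewrite author's own statement) =====
-- stated objective: alternative
-- what changed: Replaces A's three special-cased endpoint assignments and middle loop with a prefix-sum table and one uniform clamped-window difference formula.
import Mathlib
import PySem

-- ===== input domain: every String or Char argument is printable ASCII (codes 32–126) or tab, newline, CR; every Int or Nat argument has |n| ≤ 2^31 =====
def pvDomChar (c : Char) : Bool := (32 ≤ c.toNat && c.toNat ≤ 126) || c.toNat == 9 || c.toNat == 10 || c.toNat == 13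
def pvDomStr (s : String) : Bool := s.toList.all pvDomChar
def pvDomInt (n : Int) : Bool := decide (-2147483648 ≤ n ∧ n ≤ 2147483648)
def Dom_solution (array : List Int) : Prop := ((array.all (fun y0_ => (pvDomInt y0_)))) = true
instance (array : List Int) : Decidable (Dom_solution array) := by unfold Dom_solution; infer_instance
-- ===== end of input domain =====

-- B replaces A's special-cased endpoint assignments with a prefix-sum table and one
-- uniform clamped-window difference formula (alternative decomposition, same cost).

-- ===== PORT A =====
def solution (array : List Int) : List Int :=
  if array.length = 1 then array
  else if array.length = 2 then
    let result : List Int := [0, 0]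
    let result := PySem.List.pySetD result 0
      (PySem.List.pyGetD array 0 0 + PySem.List.pyGetD array 1 0)
    let result := PySem.List.pySetD result 1
      (PySem.List.pyGetD array 0 0 + PySem.List.pyGetD array 1 0)
    result
  else
    let aSize : Int := array.length
    let result : List Int := (PySem.List.pyRange 0 aSize 1).map (fun _ => (0 : Int))
    let result := PySem.List.pySetD result 0
      (PySem.List.pyGetD array 0 0 + PySem.List.pyGetD array 1 0)
    let result := PySem.List.pySetD result (aSize - 1)
      (PySem.List.pyGetD array (aSize - 1) 0 + PySem.List.pyGetD array (aSize - 2) 0)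
    (PySem.List.pyRange 1 (aSize - 1) 1).foldl
      (fun r i => PySem.List.pySetD r i
        (PySem.List.pyGetD array (i - 1) 0 + PySem.List.pyGetD array i 0 +
          PySem.List.pyGetD array (i + 1) 0)) result

-- ===== PORT B =====
def solution_alt (array : List Int) : List Int :=
  if array.length = 1 then array
  else
    let n : Int := array.length
    let P : List Int := array.foldl (fun P x => P ++ [PySem.List.pyGetD P (-1) 0 + x]) [0]
    (PySem.List.pyRange 0 n 1).map
      (fun i => PySem.List.pyGetD P (min (i + 2) n) 0 - PySem.List.pyGetD P (max (i - 1) 0) 0)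

-- ===== PRECONDITION & SPEC =====
-- Pre_ excludes only the empty list, on which A raises IndexError (result[0] on an empty result).
def Pre_solution (array : List Int) : Prop := array ≠ []
instance (array : List Int) : Decidable (Pre_solution array) := by unfold Pre_solution; infer_instance
def pvWitness_solution : List Int := [3, -1, 4, 1]

def Spec_solution (array : List Int) (out : List Int) : Prop := out = solution_alt array
instance (array : List Int) (out : List Int) : Decidable (Spec_solution array out) := by unfold Spec_solution; infer_instance

-- ===== CLAIM (what is proved, stated in full; the proofs are below) =====
def Claim_equal_solution : Prop := ∀ (array : List Int), Dom_solution array → Pre_solution array → Spec_solution array (solution array)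

-- ===== LEMMAS AND PROOFS =====

-- prefix sum of the first k elements
def pS (array : List Int) (k : Nat) : Int := (array.take k).sum

-- B's prefix list is the table of take-sums
theorem prefixP_eq (array : List Int) :
    array.foldl (fun P x => P ++ [PySem.List.pyGetD P (-1) 0 + x]) [0]
      = (List.range (array.length + 1)).map (pS array) := by
  induction array using List.reverseRecOn with
  | nil => simp [pS]
  | append_singleton l x ih =>
    rw [List.foldl_append, ih]
    have hne : (List.range (l.length + 1)).map (pS l) ≠ [] := by simp
    simp only [List.foldl_cons, List.foldl_nil]
    rw [PySem.List.pyGetD_neg_one _ _ hne]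
    have hlast : ((List.range (l.length + 1)).map (pS l)).getLast hne = pS l l.length := by
      rw [List.getLast_eq_getElem]
      simp [pS]
    rw [hlast]
    rw [List.length_append, List.length_singleton, List.range_succ (n := l.length + 1), List.map_append]
    congr 1
    · apply List.map_congr_left
      intro k hk
      simp only [List.mem_range] at hk
      simp [pS, List.take_append_of_le_length (by omega : k ≤ l.length)]
    · simp [pS, List.take_append_of_le_length (le_refl l.length), List.take_length]

-- foldl of sets over a Nat range: pointwise characterisation
theorem foldl_set_getD (g : Nat → Int) :
    ∀ (len s : Nat) (r : List Int) (j : Nat),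
      (((List.range' s len).foldl (fun r k => r.set k (g k)) r).getD j 0)
        = if s ≤ j ∧ j < s + len ∧ j < r.length then g j else r.getD j 0 := by
  intro len
  induction len with
  | zero => intro s r j; simp; intro h1 h2; omega
  | succ m ih =>
    intro s r j
    rw [List.range'_succ, List.foldl_cons, ih]
    by_cases hj : j = s
    · subst hj
      rw [if_neg (by rintro ⟨h, -⟩; omega)]
      by_cases hlen : j < r.length
      · rw [if_pos ⟨le_refl j, by omega, hlen⟩, List.getD_eq_getElem?_getD,
          List.getElem?_set_self hlen]
        simp
      · rw [if_neg (fun h => hlen h.2.2)]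
        simp [List.getD_eq_getElem?_getD, hlen]
    · have h1 : (r.set s (g s)).getD j 0 = r.getD j 0 := by
        simp [List.getD_eq_getElem?_getD, List.getElem?_set_ne (by omega : s ≠ j)]
      rw [h1]
      simp only [List.length_set]
      congr 1
      simp only [eq_iff_iff]
      constructor <;> (intro h; exact ⟨by omega, by omega, h.2.2⟩)

theorem foldl_set_length (g : Nat → Int) :
    ∀ (len s : Nat) (r : List Int),
      ((List.range' s len).foldl (fun r k => r.set k (g k)) r).length = r.length := by
  intro len
  induction len with
  | zero => intro s r; simp
  | succ m ih =>
    intro s r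
    rw [List.range'_succ, List.foldl_cons, ih, List.length_set]

theorem pS_succ (array : List Int) (k : Nat) (hk : k < array.length) :
    pS array (k + 1) = pS array k + array[k] := by
  unfold pS
  exact List.sum_take_succ _ _ hk

theorem Pm_getD (array : List Int) (m : Nat) (hm : m ≤ array.length) :
    ((List.range (array.length + 1)).map (pS array)).getD m 0 = pS array m := by
  rw [List.getD_eq_getElem _ _ (by simp; omega)]
  simp

-- the elementwise value of A's loop body, as a function of the Nat index
def gA (array : List Int) (k : Nat) : Int :=
  PySem.List.pyGetD array ((k : Int) - 1) 0 + PySem.List.pyGetD array (k : Int) 0 +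
    PySem.List.pyGetD array ((k : Int) + 1) 0

-- A = B for length ≥ 3
theorem main3 (array : List Int) (h3 : 3 ≤ array.length) :
    solution array = solution_alt array := by
  have hA : solution array =
      (List.range' 1 (array.length - 2)).foldl
        (fun r k => r.set k (gA array k))
        ((((List.range array.length).map (fun _ => (0 : Int))).set 0
            (PySem.List.pyGetD array 0 0 + PySem.List.pyGetD array 1 0)).set (array.length - 1)
          (PySem.List.pyGetD array ((array.length : Int) - 1) 0 +
            PySem.List.pyGetD array ((array.length : Int) - 2) 0)) := by
    unfold solution
    rw [if_neg (by omega : ¬ array.length = 1), if_neg (by omega : ¬ array.length = 2)]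
    dsimp only
    rw [PySem.List.pyRange_one 1 ((array.length : Int) - 1)]
    have hlen2 : (((array.length : Int) - 1) - 1).toNat = array.length - 2 := by omega
    rw [hlen2, List.foldl_map]
    rw [List.range'_eq_map_range, List.foldl_map]
    congr 1
    · funext r k
      rw [PySem.List.pySetD_of_nonneg _ _ (by omega : (0:Int) ≤ 1 + (k:Int))]
      have : ((1 : Int) + (k : Int)).toNat = 1 + k := by omega
      rw [this]
      congr 1
    · rw [PySem.List.pyRange_zero_nat, List.map_map]
      rw [PySem.List.pySetD_of_nonneg _ _ (by omega : (0:Int) ≤ (0:Int))]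
      rw [PySem.List.pySetD_of_nonneg _ _ (by omega : (0:Int) ≤ (array.length : Int) - 1)]
      have h1 : ((0:Int)).toNat = 0 := rfl
      have h2 : (((array.length : Int)) - 1).toNat = array.length - 1 := by omega
      rw [h1, h2]
      rfl
  have hB : solution_alt array =
      (List.range array.length).map (fun j =>
        pS array (min (j + 2) array.length) - pS array (j - 1)) := by
    unfold solution_alt
    rw [if_neg (by omega : ¬ array.length = 1)]
    simp only [prefixP_eq, PySem.List.pyRange_zero_nat, List.map_map]
    apply List.map_congr_left
    intro k hk
    simp only [List.mem_range] at hk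
    simp only [Function.comp_apply]
    have h2 : min ((k : Int) + 2) ((array.length : Nat) : Int)
        = ((min (k + 2) array.length : Nat) : Int) := by omega
    have h3 : max ((k : Int) - 1) 0 = ((k - 1 : Nat) : Int) := by omega
    rw [h2, h3, PySem.List.pyGetD_natCast, PySem.List.pyGetD_natCast,
      Pm_getD _ _ (by omega), Pm_getD _ _ (by omega)]
  rw [hA, hB]
  apply List.ext_getElem
  · rw [foldl_set_length]; simp
  · intro j h1 h2
    simp only [List.length_map, List.length_range] at h2
    rw [← List.getD_eq_getElem _ 0 h1, foldl_set_getD]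
    simp only [List.getElem_map, List.getElem_range, List.length_set, List.length_map,
      List.length_range]
    by_cases hmid : 1 ≤ j ∧ j < 1 + (array.length - 2)
    · rw [if_pos ⟨hmid.1, hmid.2, by omega⟩]
      obtain ⟨m, rfl⟩ : ∃ m, j = m + 1 := ⟨j - 1, by omega⟩
      unfold gA
      rw [show ((m + 1 : Nat) : Int) - 1 = ((m : Nat) : Int) by push_cast; ring,
        show ((m + 1 : Nat) : Int) + 1 = ((m + 2 : Nat) : Int) by push_cast; ring,
        PySem.List.pyGetD_natCast, PySem.List.pyGetD_natCast, PySem.List.pyGetD_natCast]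
      rw [min_eq_left (by omega)]
      have a1 : pS array (m + 1) = pS array m + array[m]'(by omega) := pS_succ array m (by omega)
      have a2 : pS array (m + 2) = pS array (m + 1) + array[m + 1]'(by omega) :=
        pS_succ array (m + 1) (by omega)
      have a3 : pS array (m + 3) = pS array (m + 2) + array[m + 2]'(by omega) :=
        pS_succ array (m + 2) (by omega)
      rw [show m + 1 + 2 = m + 3 from rfl, show m + 1 - 1 = m from rfl, a3, a2, a1]
      rw [List.getD_eq_getElem _ _ (by omega), List.getD_eq_getElem _ _ (by omega),
        List.getD_eq_getElem _ _ (by omega)]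
      ring
    · rw [if_neg (fun h => hmid ⟨h.1, h.2.1⟩)]
      have hj0 : j = 0 ∨ j = array.length - 1 := by omega
      rcases hj0 with rfl | rfl
      · rw [List.getD_eq_getElem _ _ (by simp; omega)]
        rw [List.getElem_set_ne (by omega), List.getElem_set_self (by simp; omega)]
        rw [PySem.List.pyGetD_zero, show (1 : Int) = ((1 : Nat) : Int) by norm_num,
          PySem.List.pyGetD_natCast]
        rw [show (0 + 2 : Nat) = 2 from rfl, show (0 - 1 : Nat) = 0 from rfl,
          min_eq_left (by omega)]
        have a1 : pS array 1 = pS array 0 + array[0]'(by omega) := pS_succ array 0 (by omega)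
        have a2 : pS array 2 = pS array 1 + array[1]'(by omega) := pS_succ array 1 (by omega)
        have a0 : pS array 0 = 0 := rfl
        rw [a2, a1, a0]
        rw [List.getD_eq_getElem _ _ (by omega), List.getD_eq_getElem _ _ (by omega)]
        ring
      · rw [List.getD_eq_getElem _ _ (by simp; omega)]
        rw [List.getElem_set_self (by simp; omega)]
        rw [show ((array.length : Nat) : Int) - 1 = ((array.length - 1 : Nat) : Int) by omega,
          show ((array.length : Nat) : Int) - 2 = ((array.length - 2 : Nat) : Int) by omega,
          PySem.List.pyGetD_natCast, PySem.List.pyGetD_natCast]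
        rw [min_eq_right (by omega)]
        have a1 : pS array array.length =
            pS array (array.length - 1) + array[array.length - 1]'(by omega) := by
          have := pS_succ array (array.length - 1) (by omega)
          rwa [show array.length - 1 + 1 = array.length from by omega] at this
        have a2 : pS array (array.length - 1) =
            pS array (array.length - 2) + array[array.length - 2]'(by omega) := by
          have := pS_succ array (array.length - 2) (by omega)
          rwa [show array.length - 2 + 1 = array.length - 1 from by omega] at this
        rw [a1, a2, show array.length - 1 - 1 = array.length - 2 from by omega]
        rw [List.getD_eq_getElem _ _ (by omega), List.getD_eq_getElem _ _ (by omega)]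
        ring

theorem main2 (a b : Int) : solution [a, b] = solution_alt [a, b] := by
  unfold solution solution_alt
  norm_num [pysem, PySem.List.pySetD, PySem.List.pySet?, PySem.List.pyGetD, PySem.List.pyGet?,
    PySem.List.pyIdx?, PySem.List.pyRange]
  simp [List.range_succ]

theorem solution_spec : Claim_equal_solution := by
  intro array _ hpre
  unfold Spec_solution
  match array, hpre with
  | [x], _ => simp [solution, solution_alt]
  | [x, y], _ => exact main2 x y
  | x :: y :: z :: rest, _ => exact main3 _ (by simp)
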